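-- pv_equiv track=rewrite | github.com/jpcuencat/api-transcriptions | app/utils/validators.py | validate_filename_security
-- ===== SOURCE A (Python) =====
-- def validate_filename_security(filename: str) -> bool:
--     """
--     Valida que el nombre de archivo sea seguro.
--
--     Args:
--         filename: Nombre del archivo
--
--     Returns:
--         bool: True si el nombre es seguro
--     """
--     if not filename:
--         return False
--
--     # Caracteres peligrosos
--     dangerous_chars = ['..', '/', '\\', '<', '>', ':', '"', '|', '?', '*']
--
--     for char in dangerous_chars:
--         if char in filename:
--             return False
--
--     # No debe empezar con punto (archivos ocultos)
--     if filename.startswith('.'):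
--         return False
--
--     return True
-- ===== SOURCE B (Python) =====
-- def validate_filename_security(filename: str) -> bool:
--     """Scan the filename's characters once against a forbidden-character set."""
--     if not filename:
--         return False
--     if filename[0] == '.' or '..' in filename:
--         return False
--     bad = set('/\\<>:"|?*')
--     return all(c not in bad for c in filename)
-- ===== Notes on version B (the rewrite author's own statement) =====
-- stated objective: idiomatic
-- what changed: Instead of scanning the pattern list and running a substring search of the filename for each pattern, B scans the filename's characters once against a set of forbidden characters, keeping only the empty-string guard, the double-dot substring test and the leading-dot test separate.
import Mathlib
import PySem

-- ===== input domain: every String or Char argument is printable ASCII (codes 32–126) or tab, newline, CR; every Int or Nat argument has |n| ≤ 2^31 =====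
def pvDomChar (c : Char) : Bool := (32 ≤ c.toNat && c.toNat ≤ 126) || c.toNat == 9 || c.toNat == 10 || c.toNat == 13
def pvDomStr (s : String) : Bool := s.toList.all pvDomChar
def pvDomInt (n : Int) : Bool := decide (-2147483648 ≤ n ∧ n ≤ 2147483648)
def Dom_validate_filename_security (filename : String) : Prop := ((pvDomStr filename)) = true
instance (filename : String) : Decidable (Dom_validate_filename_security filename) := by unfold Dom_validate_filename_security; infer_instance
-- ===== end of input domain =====

-- B scans the filename's characters once against a forbidden-character set instead of
-- searching the filename for each pattern of a pattern list (idiomatic/alternative; not claimed faster).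

-- ===== PORT A =====
-- the 'for char in dangerous_chars' loop, with the trailing startswith('.') check after it
def vfsLoopA (filename : String) : List String → Bool
  | [] => if PySem.Str.startswith filename "." then false else true
  | c :: rest => if PySem.Str.isIn c filename then false else vfsLoopA filename rest

def validate_filename_security (filename : String) : Bool :=
  if PySem.Str.len filename = 0 then false
  else vfsLoopA filename ["..", "/", "\\", "<", ">", ":", "\"", "|", "?", "*"]

-- ===== PORT B =====
def vfsBad : PySem.Set Char := PySem.Set.ofList "/\\<>:\"|?*".toList

def validate_filename_security_alt (filename : String) : Bool :=
  match filename.toList with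
  | [] => false
  | c :: _ =>
    if c == '.' || PySem.Str.isIn ".." filename then false
    else filename.toList.all (fun ch => !(PySem.Set.contains vfsBad ch))

-- ===== PRECONDITION & SPEC =====
def Spec_validate_filename_security (filename : String) (out : Bool) : Prop := out = validate_filename_security_alt filename
instance (filename : String) (out : Bool) : Decidable (Spec_validate_filename_security filename out) := by unfold Spec_validate_filename_security; infer_instance

-- ===== CLAIM (what is proved, stated in full; the proofs are below) =====
def Claim_equal_validate_filename_security : Prop := ∀ (filename : String), Dom_validate_filename_security filename → Spec_validate_filename_security filename (validate_filename_security filename)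

-- ===== LEMMAS AND PROOFS =====

-- 'c in filename' for a one-character pattern is membership of that character
theorem vfs_isIn_single (c : Char) (cs : String) (f : String) (h : cs.toList = [c]) :
    PySem.Str.isIn cs f = f.toList.contains c := by
  rw [Bool.eq_iff_iff, PySem.Str.isIn_iff_infix, List.contains_iff_mem, h,
    List.singleton_infix_iff]

theorem vfs_if_chain (b x : Bool) : (if b = true then false else x) = (!b && x) := by
  cases b <;> simp

-- 'every character of l avoids the set' = 'no element of the set occurs in l'
theorem vfs_all_not_bad (l : List Char) :
    (l.all fun ch => !(PySem.Set.contains vfsBad ch)) =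
      (!l.contains '/' && !l.contains '\\' && !l.contains '<' && !l.contains '>' &&
       !l.contains ':' && !l.contains '"' && !l.contains '|' && !l.contains '?' &&
       !l.contains '*') := by
  have hbad : vfsBad = ['/', '\\', '<', '>', ':', '"', '|', '?', '*'] := by decide
  rw [Bool.eq_iff_iff]
  simp [List.all_eq_true, PySem.Set.contains, hbad]
  constructor
  · intro a
    exact ⟨⟨⟨⟨⟨⟨⟨⟨fun h => (a _ h).1 rfl, fun h => (a _ h).2.1 rfl⟩, fun h => (a _ h).2.2.1 rfl⟩, fun h => (a _ h).2.2.2.1 rfl⟩, fun h => (a _ h).2.2.2.2.1 rfl⟩, fun h => (a _ h).2.2.2.2.2.1 rfl⟩, fun h => (a _ h).2.2.2.2.2.2.1 rfl⟩, fun h => (a _ h).2.2.2.2.2.2.2.1 rfl⟩, fun h => (a _ h).2.2.2.2.2.2.2.2 rfl⟩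
  · aesop

-- ===== VERDICT (by name: the statement is the Claim_ definition above) =====
theorem validate_filename_security_spec : Claim_equal_validate_filename_security := by
  intro f _
  unfold Spec_validate_filename_security
  simp only [validate_filename_security, validate_filename_security_alt, vfsLoopA]
  rw [vfs_isIn_single '/' "/" f (by decide), vfs_isIn_single '\\' "\\" f (by decide),
    vfs_isIn_single '<' "<" f (by decide), vfs_isIn_single '>' ">" f (by decide),
    vfs_isIn_single ':' ":" f (by decide), vfs_isIn_single '"' "\"" f (by decide),
    vfs_isIn_single '|' "|" f (by decide), vfs_isIn_single '?' "?" f (by decide),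
    vfs_isIn_single '*' "*" f (by decide), vfs_all_not_bad]
  cases hl : f.toList with
  | nil => simp [hl]
  | cons c t =>
    have hlen : ¬ PySem.Str.len f = 0 := by simp [PySem.Str.len_eq, hl]; omega
    have hsw : PySem.Str.startswith f "." = (c == '.') := by
      have hd : ("." : String).toList = ['.'] := by decide
      rw [Bool.eq_iff_iff]
      simp [hd, hl, PySem.Chars.startswith_iff, List.cons_prefix_cons]
      exact eq_comm
    simp only [hlen, if_false, hsw, vfs_if_chain]
    rw [Bool.eq_iff_iff]
    simp only [Bool.and_eq_true, Bool.not_eq_eq_eq_not, Bool.not_true, Bool.or_eq_false_iff,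
      and_true, and_assoc]
    tauto
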